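-- pv_equiv track=rewrite | github.com/UIZorrot/SCAICH | scihub_search.py | parse_nested_str
-- ===== SOURCE A (Python) =====
-- def parse_nested_str(data):
--     result = ""
--     for group in data:
--         for item in group:
--             entity_text: str = item.get("entity", {}).get("text", "")
--             lines = entity_text
--             result = lines
--
--     return result
-- ===== SOURCE B (Python) =====
-- def parse_nested_str(data):
--     for group in reversed(list(data)):
--         g = list(group)
--         if g:
--             return g[-1].get("entity", {}).get("text", "")
--     return ""
-- ===== Notes on version B (the rewrite author's own statement) =====
-- stated objective: simpler
-- what changed: Backward scan over the groups with an early return of the last non-empty group's last item's entity text, instead of A's full forward traversal overwriting an accumulator on every item.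
import Mathlib
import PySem

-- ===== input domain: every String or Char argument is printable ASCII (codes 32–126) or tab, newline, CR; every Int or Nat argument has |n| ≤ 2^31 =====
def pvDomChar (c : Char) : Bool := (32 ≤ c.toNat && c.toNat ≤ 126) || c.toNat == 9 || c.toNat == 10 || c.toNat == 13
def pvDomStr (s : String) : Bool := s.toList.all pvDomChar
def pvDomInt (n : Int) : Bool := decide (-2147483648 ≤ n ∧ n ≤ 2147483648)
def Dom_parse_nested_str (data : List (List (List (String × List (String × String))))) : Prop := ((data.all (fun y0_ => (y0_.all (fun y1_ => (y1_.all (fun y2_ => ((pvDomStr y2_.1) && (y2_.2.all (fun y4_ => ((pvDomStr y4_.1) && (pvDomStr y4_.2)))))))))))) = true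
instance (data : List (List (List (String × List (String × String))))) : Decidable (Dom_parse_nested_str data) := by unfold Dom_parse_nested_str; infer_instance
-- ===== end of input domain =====

-- B is a simpler decomposition: a backward scan with early exit instead of A's full
-- forward loop that overwrites an accumulator on every item. Return values only; no mutation.

-- ===== PORT A =====
-- item.get("entity", {}).get("text", "")
def pvEntityTextA (item : List (String × List (String × String))) : String :=
  ((PySem.Dict.mk item).getD "entity" []) |> fun e => (PySem.Dict.mk e).getD "text" ""

def parse_nested_str (data : List (List (List (String × List (String × String))))) : String :=
  data.foldl (fun result group =>
    group.foldl (fun _result item =>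
      let entity_text := pvEntityTextA item
      let lines := entity_text
      lines) result) ""

-- ===== PORT B =====
def pvEntityTextB (item : List (String × List (String × String))) : String :=
  ((PySem.Dict.mk item).getD "entity" []) |> fun e => (PySem.Dict.mk e).getD "text" ""

-- for group in reversed(list(data)): if g: return g[-1]... ; return ""
def pvRevScan : List (List (List (String × List (String × String)))) → String
  | [] => ""
  | g :: rest =>
    match g.getLast? with
    | some it => pvEntityTextB it
    | none => pvRevScan rest

def parse_nested_str_alt (data : List (List (List (String × List (String × String))))) : String :=
  pvRevScan data.reverse

-- ===== PRECONDITION & SPEC =====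
def Spec_parse_nested_str (data : List (List (List (String × List (String × String))))) (out : String) : Prop := out = parse_nested_str_alt data
instance (data : List (List (List (String × List (String × String))))) (out : String) : Decidable (Spec_parse_nested_str data out) := by unfold Spec_parse_nested_str; infer_instance

-- ===== CLAIM (what is proved, stated in full; the proofs are below) =====
def Claim_equal_parse_nested_str : Prop := ∀ (data : List (List (List (String × List (String × String))))), Dom_parse_nested_str data → Spec_parse_nested_str data (parse_nested_str data)

-- ===== LEMMAS AND PROOFS =====

-- A's inner loop over a group: result is the last item's entity text, or the incoming accumulator.
lemma inner_fold (g : List (List (String × List (String × String)))) (r : String) :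
    g.foldl (fun _result item =>
      let entity_text := pvEntityTextA item
      let lines := entity_text
      lines) r = (g.getLast?.map pvEntityTextA).getD r := by
  induction g generalizing r with
  | nil => rfl
  | cons a t ih =>
    simp only [List.foldl_cons, ih]
    cases t <;> simp [List.getLast?]

-- backward scan with an explicit fallback value (proof helper)
def pvRevScanAux : List (List (List (String × List (String × String)))) → String → String
  | [], r => r
  | g :: rest, r =>
    match g.getLast? with
    | some it => pvEntityTextB it
    | none => pvRevScanAux rest r

lemma aux_eq_scan (l : List (List (List (String × List (String × String))))) :
    pvRevScanAux l "" = pvRevScan l := by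
  induction l with
  | nil => rfl
  | cons g rest ih =>
    simp only [pvRevScanAux, pvRevScan]
    cases g.getLast? <;> simp [ih]

lemma foldl_aux (data : List (List (List (String × List (String × String))))) (r : String) :
    data.foldl (fun result g => (g.getLast?.map pvEntityTextA).getD result) r =
      pvRevScanAux data.reverse r := by
  induction data using List.reverseRecOn generalizing r with
  | nil => rfl
  | append_singleton d g ih =>
    rw [List.foldl_append, List.reverse_append]
    simp only [List.foldl_cons, List.foldl_nil, List.reverse_cons, List.reverse_nil,
      List.nil_append, List.cons_append, pvRevScanAux]
    cases h : g.getLast? <;> simp [ih, pvEntityTextA, pvEntityTextB]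

theorem parse_nested_str_spec : Claim_equal_parse_nested_str := by
  intro data _
  show parse_nested_str data = parse_nested_str_alt data
  unfold parse_nested_str parse_nested_str_alt
  have : ∀ (g : List (List (String × List (String × String)))) (r : String),
      g.foldl (fun _result item =>
        let entity_text := pvEntityTextA item
        let lines := entity_text
        lines) r = (g.getLast?.map pvEntityTextA).getD r := fun g r => inner_fold g r
  simp only [this]
  rw [foldl_aux, aux_eq_scan]
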